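-- pv_equiv track=rewrite | github.com/RobinTian-7/stupid_spider | finder.py | match_school
-- ===== SOURCE A (Python) =====
-- def match_school(affiliation, target_schools):
--     aff_lower = affiliation.lower().strip()
--     for name, abbr in target_schools.items():
--         if name.lower() == aff_lower:
--             return abbr
--     candidates = []
--     for name, abbr in target_schools.items():
--         nl = name.lower()
--         if nl in aff_lower or aff_lower in nl:
--             candidates.append((len(name), abbr))
--     if candidates:
--         candidates.sort(reverse=True)
--         return candidates[0][1]
--     return None
-- ===== SOURCE B (Python) =====
-- def match_school(affiliation, target_schools):
--     aff_lower = affiliation.lower().strip()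
--     first_exact = None
--     best = None
--     for name, abbr in target_schools.items():
--         nl = name.lower()
--         if first_exact is None and nl == aff_lower:
--             first_exact = abbr
--         if nl in aff_lower or aff_lower in nl:
--             cand = (len(name), abbr)
--             if best is None or cand > best:
--                 best = cand
--     if first_exact is not None:
--         return first_exact
--     if best is not None:
--         return best[1]
--     return None
-- ===== Notes on version B (the rewrite author's own statement) =====
-- stated objective: alternative
-- what changed: A makes two full scans (an early-return exact-match loop, then a candidate-list build followed by a reverse sort to pick the top tuple); B makes a single pass keeping a first-exact slot and a running lexicographic maximum (len(name), abbr), so the sort disappears.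
import Mathlib
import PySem

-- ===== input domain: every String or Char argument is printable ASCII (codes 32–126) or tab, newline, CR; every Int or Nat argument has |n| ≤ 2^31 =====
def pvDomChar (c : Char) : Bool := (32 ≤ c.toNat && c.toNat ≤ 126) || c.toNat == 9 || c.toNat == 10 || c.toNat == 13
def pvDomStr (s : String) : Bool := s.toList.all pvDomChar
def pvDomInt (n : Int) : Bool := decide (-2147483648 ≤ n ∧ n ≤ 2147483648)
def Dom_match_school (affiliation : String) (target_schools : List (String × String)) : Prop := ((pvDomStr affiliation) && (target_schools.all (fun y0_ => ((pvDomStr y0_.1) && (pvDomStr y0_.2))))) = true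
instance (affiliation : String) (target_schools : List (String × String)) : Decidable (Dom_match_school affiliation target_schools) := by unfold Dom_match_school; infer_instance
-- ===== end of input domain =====

-- B replaces A's two scans (early-return exact loop, then candidate list + reverse sort)
-- with ONE pass keeping a first-exact slot and a running lexicographic maximum (objective: alternative).

-- ===== PORT A =====
-- first loop of A: return abbr of the first name whose lowercase equals aff_lower
def msExactLoop (aff : String) : List (String × String) → Option String
  | [] => none
  | (name, abbr) :: rest =>
      if PySem.Str.lower name = aff then some abbr else msExactLoop aff rest

def match_school (affiliation : String) (target_schools : List (String × String)) : Option String :=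
  let aff_lower := PySem.Str.strip (PySem.Str.lower affiliation)
  match msExactLoop aff_lower target_schools with
  | some abbr => some abbr
  | none =>
      let candidates : List (Int × String) :=
        target_schools.foldl (fun acc p =>
          let nl := PySem.Str.lower p.1
          if PySem.Str.isIn nl aff_lower || PySem.Str.isIn aff_lower nl then
            acc ++ [(PySem.Str.len p.1, p.2)]
          else acc) []
      if candidates ≠ [] then
        -- candidates.sort(reverse=True) on (int, str) tuples, then candidates[0][1]
        (PySem.List.sorted2 candidates Prod.fst Prod.snd true).head?.map Prod.snd
      else none

-- ===== PORT B =====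
-- Python tuple comparison (len, abbr) < (len, abbr): lexicographic
def msLt (b c : Int × String) : Bool :=
  decide (b.1 < c.1) || (b.1 == c.1 && decide (b.2 < c.2))

def msStep (aff : String) (st : Option String × Option (Int × String)) (p : String × String) :
    Option String × Option (Int × String) :=
  let nl := PySem.Str.lower p.1
  let fe := match st.1 with
    | some v => some v
    | none => if nl = aff then some p.2 else none
  let best :=
    if PySem.Str.isIn nl aff || PySem.Str.isIn aff nl then
      let cand := (PySem.Str.len p.1, p.2)
      match st.2 with
      | none => some cand
      | some b => if msLt b cand then some cand else some b
    else st.2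
  (fe, best)

def match_school_alt (affiliation : String) (target_schools : List (String × String)) : Option String :=
  let aff_lower := PySem.Str.strip (PySem.Str.lower affiliation)
  let r := target_schools.foldl (msStep aff_lower) (none, none)
  match r.1 with
  | some v => some v
  | none => r.2.map Prod.snd

-- ===== PRECONDITION & SPEC =====
-- target_schools encodes a Python dict: its keys are pairwise distinct (a dict cannot hold duplicates).
def Pre_match_school (affiliation : String) (target_schools : List (String × String)) : Prop :=
  (target_schools.map Prod.fst).Nodup
instance (affiliation : String) (target_schools : List (String × String)) : Decidable (Pre_match_school affiliation target_schools) := by unfold Pre_match_school; infer_instance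

def pvWitness_match_school : String × (List (String × String)) :=
  ("MIT ", [("mit", "MIT"), ("Harvard University", "HU")])

def Spec_match_school (affiliation : String) (target_schools : List (String × String)) (out : Option String) : Prop := out = match_school_alt affiliation target_schools
instance (affiliation : String) (target_schools : List (String × String)) (out : Option String) : Decidable (Spec_match_school affiliation target_schools out) := by unfold Spec_match_school; infer_instance

-- ===== CLAIM (what is proved, stated in full; the proofs are below) =====
def Claim_equal_match_school : Prop := ∀ (affiliation : String) (target_schools : List (String × String)), Dom_match_school affiliation target_schools → Pre_match_school affiliation target_schools → Spec_match_school affiliation target_schools (match_school affiliation target_schools)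

-- ===== LEMMAS AND PROOFS =====

-- the substring condition both programs test for a dict entry p
def msCond (aff : String) (p : String × String) : Bool :=
  PySem.Str.isIn (PySem.Str.lower p.1) aff || PySem.Str.isIn aff (PySem.Str.lower p.1)

def msCand (p : String × String) : Int × String := (PySem.Str.len p.1, p.2)

-- the candidate tuples of A, as a structural recursion
def msCandList (aff : String) : List (String × String) → List (Int × String)
  | [] => []
  | p :: ts => if msCond aff p then msCand p :: msCandList aff ts else msCandList aff ts

def msMax (h c : Int × String) : Int × String := if msLt h c then c else h

def msMaxStep (b : Option (Int × String)) (c : Int × String) : Option (Int × String) :=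
  some (match b with | none => c | some h => msMax h c)

-- "x goes before y" in A's reverse sort
def msBef (c y : Int × String) : Bool := msLt y c

theorem msLt_eq (a b : Int × String) :
    msLt a b = (decide (a.1 < b.1) || (!decide (b.1 < a.1) && decide (a.2 < b.2))) := by
  rcases a with ⟨a1, a2⟩; rcases b with ⟨b1, b2⟩
  simp only [msLt]
  by_cases h1 : a1 < b1 <;> by_cases h2 : b1 < a1 <;>
    simp [h1, h2] <;> omega

theorem msLt_irrefl (a : Int × String) : msLt a a = false := by
  simp [msLt]

theorem msLt_trans {a b c : Int × String} (h1 : msLt a b = true) (h2 : msLt b c = true) :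
    msLt a c = true := by
  rcases a with ⟨a1, a2⟩; rcases b with ⟨b1, b2⟩; rcases c with ⟨c1, c2⟩
  simp only [msLt, beq_iff_eq, Bool.or_eq_true, Bool.and_eq_true, decide_eq_true_eq] at *
  rcases h1 with h1 | ⟨h1e, h1s⟩ <;> rcases h2 with h2 | ⟨h2e, h2s⟩
  · left; omega
  · left; omega
  · left; omega
  · right; exact ⟨by omega, lt_trans h1s h2s⟩

-- head of the insertion-sort fold is the running lexicographic maximum
theorem foldl_ins_head :
    ∀ (cs : List (Int × String)) (h : Int × String) (t : List (Int × String)),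
      (∀ y ∈ h :: t, msLt h y = false) →
      ∃ t', cs.foldl (fun a x => PySem.List.insertBy msBef x a) (h :: t) =
              (cs.foldl msMax h) :: t' ∧
            ∀ y ∈ cs.foldl (fun a x => PySem.List.insertBy msBef x a) (h :: t),
              msLt (cs.foldl msMax h) y = false
  | [], h, t, hmax => ⟨t, rfl, hmax⟩
  | c :: cs, h, t, hmax => by
    simp only [List.foldl_cons]
    have hins : PySem.List.insertBy msBef c (h :: t) =
        if msBef c h then c :: h :: t else h :: PySem.List.insertBy msBef c t := rfl
    by_cases hc : msLt h c = true
    · have hbef : msBef c h = true := hc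
      rw [hins, if_pos hbef]
      have hm : msMax h c = c := by simp [msMax, hc]
      rw [hm]
      apply foldl_ins_head cs c (h :: t)
      intro y hy
      rcases List.mem_cons.1 hy with rfl | hy'
      · exact msLt_irrefl y
      · by_contra hcy
        have hcy' : msLt c y = true := by
          cases hxy : msLt c y
          · exact absurd hxy hcy
          · rfl
        have := msLt_trans hc hcy'
        rw [hmax y hy'] at this; exact Bool.false_ne_true this
    · have hc' : msLt h c = false := by
        cases hxy : msLt h c
        · rfl
        · exact absurd hxy hc
      have hbef : msBef c h = false := hc'
      rw [hins, if_neg (by simp [hbef])]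
      have hm : msMax h c = h := by simp [msMax, hc']
      rw [hm]
      apply foldl_ins_head cs h (PySem.List.insertBy msBef c t)
      intro y hy
      rcases List.mem_cons.1 hy with rfl | hy'
      · exact msLt_irrefl y
      · rcases (PySem.List.mem_insertBy msBef c y t).1 hy' with rfl | hyt
        · exact hc'
        · exact hmax y (List.mem_cons_of_mem _ hyt)

-- A's reverse tuple sort is exactly the insertBy fold with msBef
theorem sorted2_eq_fold (cs : List (Int × String)) :
    PySem.List.sorted2 cs Prod.fst Prod.snd true =
      cs.foldl (fun a x => PySem.List.insertBy msBef x a) [] := by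
  unfold PySem.List.sorted2
  simp only [if_true]
  congr 1
  funext a x
  congr 1
  funext c y
  rw [msBef, msLt_eq]

-- first component of B's fold = A's first (early-return) loop
theorem fold_fst (aff : String) :
    ∀ (ts : List (String × String)) (st : Option String × Option (Int × String)),
      (ts.foldl (msStep aff) st).1 =
        (match st.1 with | some v => some v | none => msExactLoop aff ts)
  | [], st => by rcases st with ⟨fe, b⟩; cases fe <;> rfl
  | p :: ts, st => by
    rw [List.foldl_cons, fold_fst aff ts (msStep aff st p)]
    simp only [msStep]
    cases st.1 with
    | some v => rfl
    | none =>
      rw [msExactLoop]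
      split_ifs <;> rfl

-- second component of B's fold = running max over A's candidate list
theorem fold_snd (aff : String) :
    ∀ (ts : List (String × String)) (st : Option String × Option (Int × String)),
      (ts.foldl (msStep aff) st).2 =
        (msCandList aff ts).foldl msMaxStep st.2
  | [], st => rfl
  | p :: ts, st => by
    rw [List.foldl_cons, fold_snd aff ts (msStep aff st p), msCandList]
    by_cases hc : msCond aff p = true
    · have hc' := hc
      simp only [msCond] at hc'
      rw [if_pos hc, List.foldl_cons]
      congr 1
      simp only [msStep, if_pos hc']
      cases st.2 with
      | none => rfl
      | some b =>
        simp only [msMaxStep, msMax, msCand]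
        split <;> rfl
    · have hcf : msCond aff p = false := by
        cases h : msCond aff p
        · rfl
        · exact absurd h hc
      have hcs : (PySem.Str.isIn (PySem.Str.lower p.1) aff
          || PySem.Str.isIn aff (PySem.Str.lower p.1)) = false := by
        simpa only [msCond] using hcf
      rw [if_neg (fun hx => Bool.false_ne_true (hcf.symm.trans hx))]
      congr 1
      simp only [msStep, if_neg (fun hx => Bool.false_ne_true (hcs.symm.trans hx))]

-- A's candidate foldl with list append = msCandList
theorem candsA_eq (aff : String) :
    ∀ (ts : List (String × String)) (acc : List (Int × String)),
      ts.foldl (fun acc p =>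
          if PySem.Str.isIn (PySem.Str.lower p.1) aff || PySem.Str.isIn aff (PySem.Str.lower p.1)
          then acc ++ [(PySem.Str.len p.1, p.2)] else acc) acc =
        acc ++ msCandList aff ts
  | [], acc => by simp [msCandList]
  | p :: ts, acc => by
    rw [List.foldl_cons, msCandList]
    by_cases hc : msCond aff p = true
    · have hc' := hc
      simp only [msCond] at hc'
      rw [if_pos hc', if_pos hc, candsA_eq aff ts, List.append_assoc]
      rfl
    · have hcf : msCond aff p = false := by
        cases h : msCond aff p
        · rfl
        · exact absurd h hc
      have hcs : (PySem.Str.isIn (PySem.Str.lower p.1) aff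
          || PySem.Str.isIn aff (PySem.Str.lower p.1)) = false := by
        simpa only [msCond] using hcf
      rw [if_neg (fun hx => Bool.false_ne_true (hcs.symm.trans hx)),
        if_neg (fun hx => Bool.false_ne_true (hcf.symm.trans hx)), candsA_eq aff ts]

theorem fold_maxStep (cs : List (Int × String)) :
    ∀ (h : Int × String), cs.foldl msMaxStep (some h) = some (cs.foldl msMax h) := by
  induction cs with
  | nil => intro h; rfl
  | cons c cs ih =>
    intro h
    rw [List.foldl_cons, List.foldl_cons]
    show cs.foldl msMaxStep (some (msMax h c)) = _
    exact ih (msMax h c)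

-- ===== VERDICT (by name: the statement is the Claim_ definition above) =====
theorem match_school_spec : Claim_equal_match_school := by
  intro affiliation ts _ _
  show match_school affiliation ts = match_school_alt affiliation ts
  unfold match_school match_school_alt
  simp only [fold_fst, fold_snd, candsA_eq, List.nil_append]
  cases he : msExactLoop (PySem.Str.strip (PySem.Str.lower affiliation)) ts with
  | some v => rfl
  | none =>
    cases hcl : msCandList (PySem.Str.strip (PySem.Str.lower affiliation)) ts with
    | nil => rfl
    | cons c cs =>
      rw [if_pos (by simp), sorted2_eq_fold]
      have hstart : (c :: cs).foldl (fun a x => PySem.List.insertBy msBef x a) [] =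
          cs.foldl (fun a x => PySem.List.insertBy msBef x a) [c] := rfl
      obtain ⟨t', hhead, -⟩ := foldl_ins_head cs c []
        (by intro y hy; have h := List.mem_singleton.mp hy; subst h; exact msLt_irrefl _)
      rw [hstart, hhead, List.foldl_cons]
      show _ = (cs.foldl msMaxStep (some c)).map Prod.snd
      rw [fold_maxStep cs c]
      rfl
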